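-- pv_equiv track=rewrite | github.com/jethridge13/Project-Euler-Python-Scripts | functions.py | primeSum
-- ===== SOURCE A (Python) =====
-- import math
--
-- def isPrime(n):
--     if n == 1:
--         return False
--     elif n == 2 or n == 3:
--         return True
--     for i in range(1, math.ceil(math.sqrt(n)) + 1):
--         if n % i == 0 and i != 1:
--             return False
--     return True
--
-- def primeSum(n):
--     primes = []
--     for i in range(1, n+1):
--         if isPrime(i):
--             primes.append(i)
--     number = n
--     chain = []
--     for i in primes:
--         if number - i >= 0 and i != n:
--             chain.append(i)
--             number -= i
--         if number == 0:
--             break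
--     return chain
-- ===== SOURCE B (Python) =====
-- import math
--
-- def primeSum(n):
--     if n < 2:
--         return []
--     # Sieve of Eratosthenes: sieve[i] is True iff i is composite.
--     sieve = [False] * (n + 1)
--     for d in range(2, math.isqrt(n) + 1):
--         for j in range(d * d, n + 1, d):
--             sieve[j] = True
--     # Greedy chain over the primes, fused with the range scan.
--     number = n
--     chain = []
--     for p in range(2, n + 1):
--         if sieve[p]:
--             continue
--         if number - p >= 0 and p != n:
--             chain.append(p)
--             number -= p
--         if number == 0:
--             break
--     return chain
-- ===== Notes on version B (the rewrite author's own statement) =====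
-- stated objective: faster
-- what changed: Replaces per-number trial division (sqrt-bounded loop for every i up to n) with a boolean Sieve of Eratosthenes built once, and fuses the greedy chain loop into a single scan over 2..n that skips sieved composites.
import Mathlib
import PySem

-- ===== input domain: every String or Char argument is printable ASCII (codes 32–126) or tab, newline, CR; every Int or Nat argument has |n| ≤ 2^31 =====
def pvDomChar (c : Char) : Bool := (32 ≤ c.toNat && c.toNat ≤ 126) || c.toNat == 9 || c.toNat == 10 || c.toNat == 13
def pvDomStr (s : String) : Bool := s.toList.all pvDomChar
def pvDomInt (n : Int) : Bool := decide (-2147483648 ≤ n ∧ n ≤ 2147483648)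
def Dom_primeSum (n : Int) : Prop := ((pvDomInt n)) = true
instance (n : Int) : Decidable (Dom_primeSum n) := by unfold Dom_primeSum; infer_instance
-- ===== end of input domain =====

-- B replaces A's per-number trial division with a Sieve of Eratosthenes composite set
-- and fuses the greedy chain loop into one scan over 2..n (measurably faster: asymptotic).

-- ===== PORT A =====
-- math.ceil(math.sqrt(n)): hand-ported exactly for 0 ≤ n ≤ 2^31 (the only values isPrime
-- receives here): double sqrt is correctly rounded, and below 2^31 the rounding error is far
-- too small to move sqrt across an integer, so ceil(sqrt(n)) = √n for a perfect square
-- and ⌊√n⌋ + 1 otherwise.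
def ceilSqrtA (n : Int) : Int :=
  if (Nat.sqrt n.toNat : Int) * (Nat.sqrt n.toNat : Int) == n then (Nat.sqrt n.toNat : Int)
  else (Nat.sqrt n.toNat : Int) + 1

-- the 'for i in range(...)' loop of isPrime, with its early return False
def isPrimeLoopA (n : Int) : List Int → Bool
  | [] => true
  | i :: rest => if PySem.Int.mod n i == 0 && i != 1 then false else isPrimeLoopA n rest

def isPrimeA (n : Int) : Bool :=
  if n == 1 then false
  else if n == 2 || n == 3 then true
  else isPrimeLoopA n (PySem.List.pyRange 1 (ceilSqrtA n + 1) 1)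

-- the 'for i in primes' loop of primeSum, with its break
def chainLoopA (n : Int) : List Int → Int → List Int → List Int
  | [], _, chain => chain
  | i :: rest, number, chain =>
    if number - i ≥ 0 && i != n then
      if number - i == 0 then chain ++ [i] else chainLoopA n rest (number - i) (chain ++ [i])
    else
      if number == 0 then chain else chainLoopA n rest number chain

def primeSum (n : Int) : List Int :=
  let primes := (PySem.List.pyRange 1 (n + 1) 1).foldl
    (fun acc i => if isPrimeA i then acc ++ [i] else acc) []
  chainLoopA n primes n []

-- ===== PORT B =====
-- math.isqrt(n) = Nat.sqrt (exact on 0 ≤ n)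
-- the inner 'for j in range(d*d, n+1, d): sieve[j] = True' loop; the assignment 'sieve[j] = True'
-- is ported as setIfInBounds at j.toNat — exact here, since every j of the range satisfies 0 ≤ j ≤ n
def markLoop (js : List Int) (sieve : Array Bool) : Array Bool :=
  js.foldl (fun sieve j => sieve.setIfInBounds j.toNat true) sieve

-- sieve = [False]*(n+1), then the outer 'for d in range(2, isqrt(n)+1)' loop
def sieveB (n : Int) : Array Bool :=
  (PySem.List.pyRange 2 ((Nat.sqrt n.toNat : Int) + 1) 1).foldl
    (fun sieve d => markLoop (PySem.List.pyRange (d * d) (n + 1) d) sieve)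
    (Array.replicate (n + 1).toNat false)

-- the fused 'for p in range(2, n+1)' loop of B, with its continue and break;
-- the read 'sieve[p]' is ported as getD at p.toNat — exact here, since 2 ≤ p ≤ n < len(sieve)
def chainLoopB (n : Int) (sieve : Array Bool) : List Int → Int → List Int → List Int
  | [], _, chain => chain
  | p :: rest, number, chain =>
    if sieve.getD p.toNat false then chainLoopB n sieve rest number chain
    else if number - p ≥ 0 && p != n then
      if number - p == 0 then chain ++ [p] else chainLoopB n sieve rest (number - p) (chain ++ [p])
    else
      if number == 0 then chain else chainLoopB n sieve rest number chain

def primeSum_alt (n : Int) : List Int :=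
  if n < 2 then []
  else chainLoopB n (sieveB n) (PySem.List.pyRange 2 (n + 1) 1) n []

-- ===== PRECONDITION & SPEC =====
def Spec_primeSum (n : Int) (out : List Int) : Prop := out = primeSum_alt n
instance (n : Int) (out : List Int) : Decidable (Spec_primeSum n out) := by unfold Spec_primeSum; infer_instance

-- ===== CLAIM (what is proved, stated in full; the proofs are below) =====
def Claim_equal_primeSum : Prop := ∀ (n : Int), Dom_primeSum n → Spec_primeSum n (primeSum n)

-- ===== LEMMAS AND PROOFS =====

-- i has a nontrivial factorisation
def HasFac (i : Int) : Prop := ∃ d k : Int, 2 ≤ d ∧ d ≤ k ∧ d * k = i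

theorem chainLoopB_eq_filter (n : Int) (sieve : Array Bool) :
    ∀ (xs : List Int) (number : Int) (chain : List Int),
      chainLoopB n sieve xs number chain
        = chainLoopA n (xs.filter (fun p => !sieve.getD p.toNat false)) number chain := by
  intro xs
  induction xs with
  | nil => intro number chain; rfl
  | cons p rest ih =>
    intro number chain
    cases h : sieve.getD p.toNat false with
    | true =>
      simp only [chainLoopB, h, if_true, List.filter_cons, Bool.not_true, Bool.false_eq_true,
        if_false]
      exact ih number chain
    | false =>
      simp only [chainLoopB, h, List.filter_cons, Bool.not_false, if_true, Bool.false_eq_true,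
        if_false, chainLoopA, ih]

theorem getD_markLoop (js : List Int) (sieve : Array Bool) (p : Nat) (hp : p < sieve.size)
    (hjs : ∀ j ∈ js, j.toNat < sieve.size) :
    (markLoop js sieve).getD p false
      = (sieve.getD p false || js.any (fun j => j.toNat == p)) := by
  induction js generalizing sieve with
  | nil => simp [markLoop]
  | cons j rest ih =>
    have hsz : (sieve.setIfInBounds j.toNat true).size = sieve.size := Array.size_setIfInBounds
    have hstep : markLoop (j :: rest) sieve = markLoop rest (sieve.setIfInBounds j.toNat true) := rfl
    rw [hstep, ih _ (by omega) (fun j' hj' => by rw [hsz]; exact hjs j' (List.mem_cons_of_mem _ hj'))]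
    have hset : (sieve.setIfInBounds j.toNat true).getD p false
        = (if j.toNat = p then true else sieve.getD p false) := by
      simp only [Array.getD_eq_getD_getElem?, Array.getElem?_setIfInBounds]
      split
      · rename_i he
        rw [if_pos (he ▸ hp)]; rfl
      · rfl
    rw [hset, List.any_cons]
    by_cases he : j.toNat = p
    · simp [he]
    · have hc : (j.toNat == p) = false := beq_eq_false_iff_ne.mpr he
      rw [hc, Bool.false_or, if_neg he]

theorem size_markLoop (js : List Int) (sieve : Array Bool) :
    (markLoop js sieve).size = sieve.size := by
  induction js generalizing sieve with
  | nil => rfl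
  | cons j rest ih =>
    have : markLoop (j :: rest) sieve = markLoop rest (sieve.setIfInBounds j.toNat true) := rfl
    rw [this, ih]; exact Array.size_setIfInBounds

theorem getD_sieveLoop (n : Int) (hn : 0 ≤ n) (ds : List Int) (sieve : Array Bool) (p : Nat)
    (hp : p < sieve.size) (hsz : sieve.size = (n + 1).toNat) (hds : ∀ d ∈ ds, 2 ≤ d) :
    ((ds.foldl (fun s d => markLoop (PySem.List.pyRange (d * d) (n + 1) d) s) sieve).getD p false)
      = (sieve.getD p false
          || ds.any (fun d => (PySem.List.pyRange (d * d) (n + 1) d).any (fun j => j.toNat == p))) := by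
  induction ds generalizing sieve with
  | nil => simp
  | cons d rest ih =>
    have hd2 : 2 ≤ d := hds d (List.mem_cons_self)
    have hbnd : ∀ j ∈ PySem.List.pyRange (d * d) (n + 1) d, j.toNat < sieve.size := by
      intro j hj
      rw [PySem.List.mem_pyRange_iff_of_pos (by omega)] at hj
      omega
    have hsz' : (markLoop (PySem.List.pyRange (d * d) (n + 1) d) sieve).size = sieve.size :=
      size_markLoop _ _
    rw [List.foldl_cons,
      ih (markLoop (PySem.List.pyRange (d * d) (n + 1) d) sieve) (by omega) (by omega)
        (fun d' hd' => hds d' (List.mem_cons_of_mem _ hd')),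
      getD_markLoop _ _ _ hp hbnd, List.any_cons]
    cases sieve.getD p false <;>
      cases hA : (PySem.List.pyRange (d * d) (n + 1) d).any (fun j => j.toNat == p) <;> simp

-- the double range scan of the sieve hits exactly the integers with a nontrivial factorisation
theorem ranges_iff_hasFac (n p : Int) (hn : 0 ≤ n) (hpn : p ≤ n) :
    (∃ d ∈ PySem.List.pyRange 2 ((Nat.sqrt n.toNat : Int) + 1) 1,
        p ∈ PySem.List.pyRange (d * d) (n + 1) d) ↔ HasFac p := by
  constructor
  · rintro ⟨d, hd, hm⟩
    rw [PySem.List.mem_pyRange_one] at hd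
    have hd2 : 2 ≤ d := hd.1
    rw [PySem.List.mem_pyRange_iff_of_pos (by omega)] at hm
    obtain ⟨h1, h2, t, ht⟩ := hm
    exact ⟨d, d + t, hd2, by nlinarith, by linarith [ht]⟩
  · rintro ⟨d, k, hd2, hdk, hmul⟩
    have hdd : d * d ≤ n := by nlinarith
    have hs : d ≤ ((Nat.sqrt n.toNat : Nat) : Int) := by
      have h1 : d.toNat ≤ Nat.sqrt n.toNat := by
        rw [Nat.le_sqrt]
        have : (d.toNat : Int) * (d.toNat : Int) ≤ (n.toNat : Int) := by
          rw [Int.toNat_of_nonneg (by omega), Int.toNat_of_nonneg hn]; exact hdd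
        exact_mod_cast this
      omega
    refine ⟨d, ?_, ?_⟩
    · rw [PySem.List.mem_pyRange_one]; omega
    · rw [PySem.List.mem_pyRange_iff_of_pos (by omega)]
      refine ⟨by nlinarith, by omega, k - d, by ring_nf; linarith [hmul]⟩

theorem getD_sieveB (n p : Int) (hn : 2 ≤ n) (hp2 : 2 ≤ p) (hpn : p ≤ n) :
    ((sieveB n).getD p.toNat false = true) ↔ HasFac p := by
  unfold sieveB
  rw [getD_sieveLoop n (by omega) _ _ _ (by simp [Array.size_replicate]; omega)
    (by simp [Array.size_replicate]) (fun d hd => by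
      rw [PySem.List.mem_pyRange_one] at hd; exact hd.1)]
  have hrep : (Array.replicate (n + 1).toNat false).getD p.toNat false = false := by
    rw [Array.getD_eq_getD_getElem?, Array.getElem?_replicate, if_pos (by omega)]
    rfl
  rw [hrep, Bool.false_or, List.any_eq_true]
  rw [← ranges_iff_hasFac n p (by omega) hpn]
  constructor
  · rintro ⟨d, hd, hin⟩
    rw [List.any_eq_true] at hin
    obtain ⟨j, hj, hjp⟩ := hin
    have hd2 : 2 ≤ d := by rw [PySem.List.mem_pyRange_one] at hd; exact hd.1
    have hj0 : 0 ≤ j := by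
      rw [PySem.List.mem_pyRange_iff_of_pos (by omega)] at hj
      nlinarith [hj.1]
    have : j = p := by
      have h : j.toNat = p.toNat := by simpa using hjp
      omega
    exact ⟨d, hd, this ▸ hj⟩
  · rintro ⟨d, hd, hin⟩
    refine ⟨d, hd, List.any_eq_true.mpr ⟨p, hin, by simp⟩⟩

theorem isPrimeLoopA_eq_all (n : Int) (xs : List Int) :
    isPrimeLoopA n xs = true ↔ ∀ j ∈ xs, ¬(PySem.Int.mod n j = 0 ∧ j ≠ 1) := by
  induction xs with
  | nil => simp [isPrimeLoopA]
  | cons j rest ih =>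
    simp only [isPrimeLoopA, List.mem_cons]
    by_cases h : (PySem.Int.mod n j == 0 && j != 1) = true
    · rw [if_pos h]
      constructor
      · intro hf; exact absurd hf (by simp)
      · intro hall; exact ((hall j (Or.inl rfl)) (by simpa using h)).elim
    · rw [if_neg h, ih]
      constructor
      · rintro hall j' (rfl | hj')
        · intro hc; exact h (by simpa using hc)
        · exact hall j' hj'
      · intro hall j' hj'; exact hall j' (Or.inr hj')

theorem isPrimeA_iff (i : Int) (hi : 2 ≤ i) : isPrimeA i = true ↔ ¬ HasFac i := by
  rcases eq_or_lt_of_le hi with h2 | h2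
  · subst i
    simp only [isPrimeA]; norm_num
    rintro ⟨d, k, hd, hdk, hmul⟩; nlinarith
  rcases (show i = 3 ∨ 4 ≤ i by omega) with h3 | h4
  · subst i
    simp only [isPrimeA]; norm_num
    rintro ⟨d, k, hd, hdk, hmul⟩; nlinarith
  -- i ≥ 4: the trial-division loop
  have hbr : isPrimeA i = isPrimeLoopA i (PySem.List.pyRange 1 (ceilSqrtA i + 1) 1) := by
    unfold isPrimeA
    rw [if_neg (by simp; omega), if_neg (by simp; omega)]
  -- facts about s = ⌊√i⌋ and c = ceil(√i)
  have hs : (0:Int) ≤ i.toNat.sqrt := by positivity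
  have hss : (i.toNat.sqrt : Int) * (i.toNat.sqrt : Int) ≤ i := by
    have h : (i.toNat.sqrt * i.toNat.sqrt : Int) ≤ (i.toNat : Int) := by
      exact_mod_cast Nat.sqrt_le i.toNat
    rw [Int.toNat_of_nonneg (by omega)] at h
    linarith
  have hlt : i < ((i.toNat.sqrt : Int) + 1) * ((i.toNat.sqrt : Int) + 1) := by
    have h : (i.toNat : Int) < (((i.toNat.sqrt + 1) * (i.toNat.sqrt + 1) : Nat) : Int) := by
      exact_mod_cast Nat.lt_succ_sqrt i.toNat
    rw [Int.toNat_of_nonneg (by omega)] at h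
    push_cast at h; linarith
  have hs2 : (2:Int) ≤ i.toNat.sqrt := by nlinarith
  have hcs : ceilSqrtA i = (i.toNat.sqrt : Int) ∨ ceilSqrtA i = (i.toNat.sqrt : Int) + 1 := by
    unfold ceilSqrtA; split
    · exact Or.inl rfl
    · exact Or.inr rfl
  have hcc : i ≤ ceilSqrtA i * ceilSqrtA i := by
    unfold ceilSqrtA
    by_cases he : ((i.toNat.sqrt : Int) * (i.toNat.sqrt : Int) == i) = true
    · rw [if_pos he]
      have : (i.toNat.sqrt : Int) * (i.toNat.sqrt : Int) = i := by simpa using he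
      omega
    · rw [if_neg he]
      nlinarith
  have hc0 : 0 ≤ ceilSqrtA i := by rcases hcs with h | h <;> omega
  have hcub : ceilSqrtA i ≤ (i.toNat.sqrt : Int) + 1 := by rcases hcs with h | h <;> omega
  rw [hbr, isPrimeLoopA_eq_all]
  constructor
  · -- no divisor in [2, c]  →  no factorisation
    intro hall hf
    obtain ⟨d, k, hd2, hdk, hmul⟩ := hf
    have hdc : d ≤ ceilSqrtA i := by nlinarith
    refine hall d ?_ ⟨?_, by omega⟩
    · rw [PySem.List.mem_pyRange_one]; omega
    · rw [PySem.Int.mod_eq_zero_iff_dvd]; exact ⟨k, hmul.symm⟩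
  · -- no factorisation → the loop never fires
    intro hnf j hj hc
    obtain ⟨hmod, hne1⟩ := hc
    rw [PySem.List.mem_pyRange_one] at hj
    rw [PySem.Int.mod_eq_zero_iff_dvd] at hmod
    obtain ⟨m, hm⟩ := hmod
    have hj2 : 2 ≤ j := by omega
    have hm1 : 0 < m := by nlinarith
    have hm2 : 2 ≤ m := by
      rcases (show m = 1 ∨ 2 ≤ m by omega) with rfl | h
      · exfalso
        have hij : i = j := by omega
        nlinarith
      · exact h
    rcases le_total j m with h | h
    · exact hnf ⟨j, m, hj2, h, hm.symm⟩
    · exact hnf ⟨m, j, hm2, h, by linarith [hm]⟩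

theorem primes_eq (n : Int) (hn : 2 ≤ n) :
    (PySem.List.pyRange 1 (n + 1) 1).filter isPrimeA
      = (PySem.List.pyRange 2 (n + 1) 1).filter (fun p => !(sieveB n).getD p.toNat false) := by
  rw [PySem.List.pyRange_one_cons (by omega : (1:Int) < n + 1)]
  rw [List.filter_cons]
  norm_num [show isPrimeA 1 = false from rfl]
  apply List.filter_congr
  intro p hp
  rw [PySem.List.mem_pyRange_one] at hp
  have h1 : isPrimeA p = true ↔ ¬ HasFac p := isPrimeA_iff p (by omega)
  have h2 : ((sieveB n).getD p.toNat false = true) ↔ HasFac p :=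
    getD_sieveB n p hn (by omega) (by omega)
  cases ha : isPrimeA p <;> cases hb : (sieveB n).getD p.toNat false <;> simp_all

-- ===== VERDICT (by name: the statement is the Claim_ definition above) =====
theorem primeSum_spec : Claim_equal_primeSum := by
  intro n _
  unfold Spec_primeSum primeSum primeSum_alt
  simp only [PySem.List.foldl_append_if_eq_filter, List.nil_append]
  by_cases h2 : n < 2
  · rw [if_pos h2]
    rcases lt_or_ge n 1 with h1 | h1
    · rw [PySem.List.pyRange_one_eq_nil (by omega)]
      simp [List.filter, chainLoopA]
    · have : n = 1 := by omega
      subst this; decide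
  · rw [if_neg h2, chainLoopB_eq_filter, ← primes_eq n (by omega)]
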